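-- pv_equiv track=rewrite | github.com/agdeon/CVFBot | test_scripts.py | group_by_dispersion
-- ===== SOURCE A (Python) =====
-- def group_by_dispersion(arr, d):
--     grouped = []
--     prev = None
--     lvl = 0
--     for item in arr:
--         if prev is None:
--             prev = item
--         if len(grouped) == 0:
--             grouped.append([])
--
--         if prev - d <= item <= prev + d:
--             grouped[lvl].append(item)
--         else:
--             grouped.append([])
--             lvl += 1
--             grouped[lvl].append(item)
--         prev = item
--
--     return grouped
-- ===== SOURCE B (Python) =====
-- def group_by_dispersion(arr, d):
--     # Build the groups back-to-front in one reversed pass: an item joins the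
--     # group of its successor when it is within d of it (closeness is symmetric,
--     # so this matches A's previous-element test), otherwise it starts a new
--     # group.  Groups are accumulated reversed and flipped once at the end.
--     groups = []   # completed groups, rightmost group first
--     cur = []      # current group, in reverse order
--     for x in reversed(list(arr)):
--         if cur and not (x - d <= cur[-1] <= x + d):
--             groups.append(cur[::-1])
--             cur = []
--         cur.append(x)
--     if cur:
--         groups.append(cur[::-1])
--     return groups[::-1]
-- ===== Notes on version B (the rewrite author's own statement) =====
-- stated objective: alternative
-- what changed: B builds the groups back-to-front in one reversed pass, prepending each item to the following group when it is within d of that group's first element (closeness is symmetric) or opening a new group, instead of A's forward state machine with prev/lvl index bookkeeping.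
-- intended difference: For nonempty arr with d < 0 the within-d test can never hold, so A returns a spurious leading empty group ([[], [x1], [x2], ...]) while B returns just the singleton groups ([[x1], [x2], ...]), which is the intended grouping. — e.g. on group_by_dispersion([0], -1): A returns [[], [0]], B returns [[0]]
import Mathlib
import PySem

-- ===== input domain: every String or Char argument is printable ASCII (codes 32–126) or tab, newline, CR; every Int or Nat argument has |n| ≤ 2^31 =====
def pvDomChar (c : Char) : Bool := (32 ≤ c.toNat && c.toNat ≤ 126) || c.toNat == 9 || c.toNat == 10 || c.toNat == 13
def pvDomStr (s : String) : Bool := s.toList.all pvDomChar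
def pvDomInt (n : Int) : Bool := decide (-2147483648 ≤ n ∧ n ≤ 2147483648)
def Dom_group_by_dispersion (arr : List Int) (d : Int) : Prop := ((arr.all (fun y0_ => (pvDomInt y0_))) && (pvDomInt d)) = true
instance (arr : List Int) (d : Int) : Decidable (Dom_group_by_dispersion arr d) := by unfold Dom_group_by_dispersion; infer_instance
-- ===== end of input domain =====

-- B builds the groups back-to-front in one reversed pass instead of A's forward
-- prev/lvl state machine; for d < 0 (nonempty arr) A keeps a spurious leading
-- empty group while B returns the singleton groups (see D_ below).

-- ===== PORT A =====
-- one loop iteration of A: state = (grouped, prev, lvl)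
def gbdStep (d : Int) (st : List (List Int) × Option Int × Nat) (item : Int) :
    List (List Int) × Option Int × Nat :=
  let prev : Int := st.2.1.getD item              -- 'if prev is None: prev = item'
  let grouped := if st.1.length = 0 then st.1 ++ [[]] else st.1
  if prev - d ≤ item ∧ item ≤ prev + d then
    (grouped.modify st.2.2 (· ++ [item]), some item, st.2.2)
  else
    ((grouped ++ [[]]).modify (st.2.2 + 1) (· ++ [item]), some item, st.2.2 + 1)

def group_by_dispersion (arr : List Int) (d : Int) : List (List Int) :=
  (arr.foldl (gbdStep d) ([], none, 0)).1

-- ===== PORT B =====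
-- one iteration of B's reversed pass: state = (groups, cur); 'if cur and not
-- (x - d <= cur[-1] <= x + d): groups.append(cur[::-1]); cur = []' then
-- 'cur.append(x)' (cur[-1] = getLastD, only read when cur is nonempty)
def gbdRevStep (d : Int) (st : List (List Int) × List Int) (x : Int) :
    List (List Int) × List Int :=
  if st.2 ≠ [] ∧ ¬(x - d ≤ st.2.getLastD 0 ∧ st.2.getLastD 0 ≤ x + d) then
    (st.1 ++ [st.2.reverse], [x])
  else
    (st.1, st.2 ++ [x])

def group_by_dispersion_alt (arr : List Int) (d : Int) : List (List Int) :=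
  let st := arr.reverse.foldl (gbdRevStep d) ([], [])   -- 'for x in reversed(list(arr))'
  (if st.2 ≠ [] then st.1 ++ [st.2.reverse] else st.1).reverse

-- ===== PRECONDITION & SPEC =====
-- For nonempty arr with d < 0 the within-d test can never hold, so A returns a
-- spurious leading empty group while B returns just the singleton groups,
-- which is the intended grouping.
def D_group_by_dispersion (arr : List Int) (d : Int) : Prop := arr ≠ [] ∧ d < 0
instance (arr : List Int) (d : Int) : Decidable (D_group_by_dispersion arr d) := by
  unfold D_group_by_dispersion; infer_instance

def Spec_group_by_dispersion (arr : List Int) (d : Int) (out : List (List Int)) : Prop :=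
  ¬ D_group_by_dispersion arr d → out = group_by_dispersion_alt arr d
instance (arr : List Int) (d : Int) (out : List (List Int)) : Decidable (Spec_group_by_dispersion arr d out) := by
  unfold Spec_group_by_dispersion; infer_instance

def pvDiffWitness_group_by_dispersion : List Int × Int := ([0], -1)
def pvDiffWitnessOut_group_by_dispersion : (List (List Int)) × (List (List Int)) :=
  ([[], [0]], [[0]])

-- ===== CLAIM (what is proved, stated in full; the proofs are below) =====
def Claim_unchanged_group_by_dispersion : Prop := ∀ (arr : List Int) (d : Int), Dom_group_by_dispersion arr d → Spec_group_by_dispersion arr d (group_by_dispersion arr d)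
def Claim_changed_group_by_dispersion : Prop := Dom_group_by_dispersion (pvDiffWitness_group_by_dispersion.1) (pvDiffWitness_group_by_dispersion.2) ∧ D_group_by_dispersion (pvDiffWitness_group_by_dispersion.1) (pvDiffWitness_group_by_dispersion.2) ∧ group_by_dispersion (pvDiffWitness_group_by_dispersion.1) (pvDiffWitness_group_by_dispersion.2) = pvDiffWitnessOut_group_by_dispersion.1 ∧ group_by_dispersion_alt (pvDiffWitness_group_by_dispersion.1) (pvDiffWitness_group_by_dispersion.2) = pvDiffWitnessOut_group_by_dispersion.2 ∧ pvDiffWitnessOut_group_by_dispersion.1 ≠ pvDiffWitnessOut_group_by_dispersion.2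
def Claim_exact_group_by_dispersion : Prop := ∀ (arr : List Int) (d : Int), Dom_group_by_dispersion arr d → D_group_by_dispersion arr d → group_by_dispersion arr d ≠ group_by_dispersion_alt arr d

-- ===== LEMMAS AND PROOFS =====

-- canonical recursion both ports are reduced to
def gbGo (d : Int) (cur : List Int) (prev : Int) : List Int → List (List Int)
  | [] => [cur]
  | y :: ys => if prev - d ≤ y ∧ y ≤ prev + d then gbGo d (cur ++ [y]) y ys
               else cur :: gbGo d [y] y ys

-- B's pass, rephrased as the structurally recursive prepend fold it computes
def gbdPrepend (d : Int) (x : Int) (out : List (List Int)) : List (List Int) :=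
  match out with
  | (y :: g) :: rest =>
      if x - d ≤ y ∧ y ≤ x + d then (x :: y :: g) :: rest else [x] :: (y :: g) :: rest
  | _ => [x] :: out

def gbB (d : Int) (arr : List Int) : List (List Int) := arr.foldr (gbdPrepend d) []

theorem modify_append_singleton (gs : List (List Int)) (cur : List Int)
    (f : List Int → List Int) : (gs ++ [cur]).modify gs.length f = gs ++ [f cur] := by
  induction gs with
  | nil => simp
  | cons g gs ih => simp [ih]

-- invariant of A's loop once the first item has been processed
theorem foldlA_char (d : Int) (xs : List Int) :
    ∀ (gs : List (List Int)) (cur : List Int) (prev : Int),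
    (xs.foldl (gbdStep d) (gs ++ [cur], some prev, gs.length)).1 = gs ++ gbGo d cur prev xs := by
  induction xs with
  | nil => intro gs cur prev; simp [gbGo]
  | cons y ys ih =>
    intro gs cur prev
    by_cases h : prev - d ≤ y ∧ y ≤ prev + d
    · have hs : gbdStep d (gs ++ [cur], some prev, gs.length) y
          = (gs ++ [cur ++ [y]], some y, gs.length) := by
        simp [gbdStep, h, modify_append_singleton]
      simp only [List.foldl_cons, hs, ih, gbGo, if_pos h]
    · have hm : ((gs ++ [cur]) ++ [[]]).modify (gs.length + 1) (· ++ [y])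
          = (gs ++ [cur]) ++ [[y]] := by
        have := modify_append_singleton (gs ++ [cur]) [] (· ++ [y])
        simpa using this
      have h' : ¬(prev ≤ y + d ∧ y ≤ prev + d) := by omega
      have hs : gbdStep d (gs ++ [cur], some prev, gs.length) y
          = ((gs ++ [cur]) ++ [[y]], some y, (gs ++ [cur]).length) := by
        simp [gbdStep, h']
        simpa using hm
      have := ih (gs ++ [cur]) [y] y
      simp only [List.foldl_cons, hs, this, gbGo, if_neg h]
      simp

theorem portA_pos (d x : Int) (xs : List Int) (hd : 0 ≤ d) :
    group_by_dispersion (x :: xs) d = gbGo d [x] x xs := by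
  have h1 : gbdStep d ([], none, 0) x = ([[x]], some x, 0) := by
    simp [gbdStep, List.modify]
    omega
  have := foldlA_char d xs [] [x] x
  simpa [group_by_dispersion, h1] using this

theorem portA_neg (d x : Int) (xs : List Int) (hd : d < 0) :
    group_by_dispersion (x :: xs) d = [] :: gbGo d [x] x xs := by
  have h1 : gbdStep d ([], none, 0) x = ([[], [x]], some x, 1) := by
    simp [gbdStep, List.modify]
    omega
  have := foldlA_char d xs [[]] [x] x
  simpa [group_by_dispersion, h1] using this

-- the prepend fold always produces a group starting with the first element
theorem gbB_shape (d : Int) (xs : List Int) : ∀ (x : Int),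
    ∃ g rest, gbB d (x :: xs) = (x :: g) :: rest := by
  induction xs with
  | nil => intro x; exact ⟨[], [], rfl⟩
  | cons y ys ih =>
    intro x
    obtain ⟨g0, rest0, h0⟩ := ih y
    have hstep : gbB d (x :: y :: ys) = gbdPrepend d x (gbB d (y :: ys)) := rfl
    by_cases h : x - d ≤ y ∧ y ≤ x + d
    · exact ⟨y :: g0, rest0, by rw [hstep, h0]; simp only [gbdPrepend]; rw [if_pos h]⟩
    · exact ⟨[], (y :: g0) :: rest0, by rw [hstep, h0]; simp only [gbdPrepend]; rw [if_neg h]⟩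

theorem gbGo_eq_gbB (d : Int) (xs : List Int) :
    ∀ (x : Int) (cur g : List Int) (rest : List (List Int)),
    gbB d (x :: xs) = (x :: g) :: rest →
    gbGo d (cur ++ [x]) x xs = (cur ++ x :: g) :: rest := by
  induction xs with
  | nil =>
    intro x cur g rest h
    have hg : ([x] : List Int) :: ([] : List (List Int)) = (x :: g) :: rest := by
      simpa [gbB, gbdPrepend] using h
    obtain ⟨h1, h2⟩ := by exact And.intro (List.head_eq_of_cons_eq hg) (List.tail_eq_of_cons_eq hg)
    simp [gbGo, ← h2, (List.cons.injEq .. ▸ h1).2]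
  | cons y ys ih =>
    intro x cur g rest h
    obtain ⟨g0, rest0, h0⟩ := gbB_shape d ys y
    have hstep : gbB d (x :: y :: ys) = gbdPrepend d x ((y :: g0) :: rest0) := by
      rw [show gbB d (x :: y :: ys) = gbdPrepend d x (gbB d (y :: ys)) from rfl, h0]
    by_cases hc : x - d ≤ y ∧ y ≤ x + d
    · have : (x :: y :: g0) :: rest0 = (x :: g) :: rest := by
        rw [← h, hstep]; simp only [gbdPrepend]; rw [if_pos hc]
      have hg : y :: g0 = g := ((List.cons.injEq .. ▸ (List.head_eq_of_cons_eq this)).2)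
      have hr : rest0 = rest := List.tail_eq_of_cons_eq this
      have := ih y (cur ++ [x]) g0 rest0 h0
      simp only [gbGo, if_pos hc, this]
      simp [← hg, ← hr]
    · have : ([x] : List Int) :: (y :: g0) :: rest0 = (x :: g) :: rest := by
        rw [← h, hstep]; simp only [gbdPrepend]; rw [if_neg hc]
      have hg : ([] : List Int) = g := ((List.cons.injEq .. ▸ (List.head_eq_of_cons_eq this)).2)
      have hr : (y :: g0) :: rest0 = rest := List.tail_eq_of_cons_eq this
      have hgo : gbGo d [y] y ys = (y :: g0) :: rest0 := by
        have := ih y [] g0 rest0 h0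
        simpa using this
      simp only [gbGo, if_neg hc, hgo]
      simp [← hg, ← hr]

theorem gbB_eq_gbGo (d x : Int) (xs : List Int) :
    gbB d (x :: xs) = gbGo d [x] x xs := by
  obtain ⟨g, rest, h⟩ := gbB_shape d xs x
  have := gbGo_eq_gbB d xs x [] g rest h
  simp at this
  rw [h, this]

-- B's reversed foldl computes the prepend fold: invariant of its state
theorem portB_inv (d : Int) (xs : List Int) :
    (((xs.foldr (fun x st => gbdRevStep d st x) ([], [])).2 = []) ↔ xs = []) ∧
    ((if (xs.foldr (fun x st => gbdRevStep d st x) ([], [])).2 ≠ [] then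
        (xs.foldr (fun x st => gbdRevStep d st x) ([], [])).1
          ++ [(xs.foldr (fun x st => gbdRevStep d st x) ([], [])).2.reverse]
      else (xs.foldr (fun x st => gbdRevStep d st x) ([], [])).1).reverse = gbB d xs) := by
  induction xs with
  | nil => exact ⟨by simp, by simp [gbB]⟩
  | cons x ys ih =>
    obtain ⟨ihe, iho⟩ := ih
    cases hys : ys with
    | nil =>
      subst hys
      constructor
      · simp [gbdRevStep]
      · simp [gbdRevStep, gbB, gbdPrepend]
    | cons y ys' =>
      subst hys
      simp only [List.foldr_cons] at ihe iho ⊢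
      set st := gbdRevStep d (ys'.foldr (fun x st => gbdRevStep d st x) ([], [])) y with hst
      have hc_ne : st.2 ≠ [] := fun h => (List.cons_ne_nil y ys') (ihe.mp h)
      obtain ⟨g0, rest0, h0⟩ := gbB_shape d ys' y
      have hout : (st.1 ++ [st.2.reverse]).reverse = gbB d (y :: ys') := by
        simpa [hc_ne] using iho
      have hrev : st.2.reverse :: st.1.reverse = (y :: g0) :: rest0 := by
        rw [← h0, ← hout]; simp
      have hc2 : st.2.reverse = y :: g0 := List.head_eq_of_cons_eq hrev
      have hr1 : st.1.reverse = rest0 := List.tail_eq_of_cons_eq hrev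
      have hlast : st.2.getLastD 0 = y := by
        have h2 : st.2 = (y :: g0).reverse := by rw [← hc2]; simp
        rw [h2]; simp
      have hstep : gbB d (x :: y :: ys') = gbdPrepend d x ((y :: g0) :: rest0) := by
        rw [show gbB d (x :: y :: ys') = gbdPrepend d x (gbB d (y :: ys')) from rfl, h0]
      by_cases hc : x - d ≤ y ∧ y ≤ x + d
      · have hs : gbdRevStep d st x = (st.1, st.2 ++ [x]) := by
          simp only [gbdRevStep, hlast]; rw [if_neg (by tauto)]
        have hpre : gbdPrepend d x ((y :: g0) :: rest0) = (x :: y :: g0) :: rest0 := by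
          simp only [gbdPrepend]; rw [if_pos hc]
        refine ⟨by simp [hs], ?_⟩
        rw [hs, hstep, hpre]
        simp [hc2, hr1]
      · have hs : gbdRevStep d st x = (st.1 ++ [st.2.reverse], [x]) := by
          simp only [gbdRevStep, hlast]; rw [if_pos ⟨hc_ne, hc⟩]
        have hpre : gbdPrepend d x ((y :: g0) :: rest0) = [x] :: (y :: g0) :: rest0 := by
          simp only [gbdPrepend]; rw [if_neg hc]
        refine ⟨by simp [hs], ?_⟩
        rw [hs, hstep, hpre]
        simp [hc2, hr1]

theorem portB_eq_gbB (d : Int) (arr : List Int) :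
    group_by_dispersion_alt arr d = gbB d arr := by
  have h := (portB_inv d arr).2
  simpa [group_by_dispersion_alt, List.foldl_reverse] using h

-- ===== VERDICT (by name: the statement is the Claim_ definition above) =====
theorem group_by_dispersion_spec : Claim_unchanged_group_by_dispersion := by
  intro arr d _ hD
  unfold D_group_by_dispersion at hD
  cases arr with
  | nil => rfl
  | cons x xs =>
    have hd : 0 ≤ d := by
      by_contra h
      exact hD ⟨by simp, by omega⟩
    rw [portA_pos d x xs hd, portB_eq_gbB, gbB_eq_gbGo]

theorem group_by_dispersion_changed : Claim_changed_group_by_dispersion := by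
  unfold Claim_changed_group_by_dispersion; decide

theorem group_by_dispersion_tight : Claim_exact_group_by_dispersion := by
  intro arr d _ hD
  obtain ⟨hne, hd⟩ := hD
  cases arr with
  | nil => exact absurd rfl hne
  | cons x xs =>
    rw [portA_neg d x xs hd, portB_eq_gbB, gbB_eq_gbGo]
    intro h
    have := congrArg List.length h
    simp at this
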